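-- pv_equiv track=rewrite | github.com/IlyaKrasnorudskiy/python_training | ind 13 04/1.py | same_digit_sum
-- ===== SOURCE A (Python) =====
-- def digit_sum(n):
--     num_str = str(abs(n))
--     sums = 0
--     for char in num_str:
--         digit = int(char)
--         sums += digit
--
--     return sums
--
-- def same_digit_sum(arr):
--     if len(arr) == 0:
--         return True
--
--     first_sum = digit_sum(arr[0])
--     for number in arr[1:]:
--         current_sum = digit_sum(number)
--         if current_sum != first_sum:
--             return False
--     return True
-- ===== SOURCE B (Python) =====
-- def digit_sum(n):
--     n = abs(n)
--     s = 0
--     while n: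
--         n, d = divmod(n, 10)
--         s += d
--     return s
--
-- def same_digit_sum(arr):
--     return len({digit_sum(x) for x in arr}) <= 1
-- ===== Notes on version B (the rewrite author's own statement) =====
-- stated objective: simpler
-- what changed: digit_sum uses an arithmetic divmod loop instead of iterating over str(abs(n)), and same_digit_sum collects all digit sums into a set and checks it has at most one element instead of the early-exit compare-to-first loop.
import Mathlib
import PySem

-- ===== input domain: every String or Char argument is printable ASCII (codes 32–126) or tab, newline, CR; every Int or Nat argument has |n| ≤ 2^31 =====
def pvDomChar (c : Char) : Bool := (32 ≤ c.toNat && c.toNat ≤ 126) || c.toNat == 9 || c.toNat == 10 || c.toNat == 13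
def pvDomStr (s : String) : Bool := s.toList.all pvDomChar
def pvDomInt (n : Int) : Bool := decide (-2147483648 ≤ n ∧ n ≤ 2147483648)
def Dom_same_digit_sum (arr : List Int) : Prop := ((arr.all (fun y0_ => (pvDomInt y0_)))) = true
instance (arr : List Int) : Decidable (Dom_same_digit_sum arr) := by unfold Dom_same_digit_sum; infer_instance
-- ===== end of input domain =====

-- B replaces A's str-iteration digit sum by an arithmetic divmod loop and the early-exit
-- compare-to-first scan by "the set of all digit sums has at most one element" (objective: simpler).

-- ===== PORT A =====
-- digit_sum of A: iterate over the characters of str(abs(n)); int(char) is PySem.Int.ofChars? on the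
-- one-character string (always a decimal digit here, so ofChars? is some; .getD 0 is unreachable).
def digit_sum_A (n : Int) : Int :=
  (PySem.Int.toChars |n|).foldl (fun sums c => sums + (PySem.Int.ofChars? [c]).getD 0) 0

-- the 'for number in arr[1:]' loop with its early 'return False'
def loop_A (first_sum : Int) : List Int → Bool
  | [] => true
  | number :: rest =>
      if digit_sum_A number ≠ first_sum then false else loop_A first_sum rest

def same_digit_sum (arr : List Int) : Bool :=
  if arr.length = 0 then true
  else
    -- arr[0]: in range because the length-0 case returned above; .getD 0 is unreachable
    let first_sum := digit_sum_A ((PySem.List.pyGet? arr 0).getD 0)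
    loop_A first_sum (PySem.List.slice arr (some 1) none)

-- ===== PORT B =====
-- the 'while n: n, d = divmod(n, 10); s += d' loop of B's digit_sum (on n = abs(n) : Nat)
def digit_loop_B (n : Nat) (s : Int) : Int :=
  if n = 0 then s else digit_loop_B (n / 10) (s + (n % 10 : Int))

def digit_sum_B (n : Int) : Int := digit_loop_B n.natAbs 0

def same_digit_sum_alt (arr : List Int) : Bool :=
  decide (PySem.Set.len (PySem.Set.ofList (arr.map digit_sum_B)) ≤ 1)

-- ===== PRECONDITION & SPEC =====
def Spec_same_digit_sum (arr : List Int) (out : Bool) : Prop := out = same_digit_sum_alt arr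
instance (arr : List Int) (out : Bool) : Decidable (Spec_same_digit_sum arr out) := by unfold Spec_same_digit_sum; infer_instance

-- ===== CLAIM (what is proved, stated in full; the proofs are below) =====
def Claim_equal_same_digit_sum : Prop := ∀ (arr : List Int), Dom_same_digit_sum arr → Spec_same_digit_sum arr (same_digit_sum arr)

-- ===== LEMMAS AND PROOFS =====

-- value a single character contributes in A's loop
def charVal (c : Char) : Int := (PySem.Int.ofChars? [c]).getD 0

-- mathematical digit sum, the common characterisation of both digit-sum loops
def dsum (n : Nat) : Int :=
  if n = 0 then 0 else (n % 10 : Int) + dsum (n / 10)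

lemma charVal_digitChar (d : Nat) (hd : d < 10) : charVal (Nat.digitChar d) = d := by
  interval_cases d <;> decide

lemma foldl_charVal (l : List Char) (s : Int) :
    l.foldl (fun a c => a + charVal c) s = s + (l.map charVal).sum := by
  induction l generalizing s with
  | nil => simp
  | cons c t ih => simp [List.foldl, ih (s + charVal c)]; ring

lemma sum_toDigitsCore (fuel : Nat) : ∀ (n : Nat) (acc : List Char), n < fuel →
    ((Nat.toDigitsCore 10 fuel n acc).map charVal).sum = dsum n + (acc.map charVal).sum := by
  induction fuel with
  | zero => intro n acc h; omega
  | succ fuel ih =>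
      intro n acc h
      simp only [Nat.toDigitsCore]
      by_cases h0 : n / 10 = 0
      · rw [if_pos h0]
        have hds : dsum n = ((n % 10 : Nat) : Int) := by
          rw [dsum]
          rcases Nat.eq_zero_or_pos n with hn | hn
          · simp [hn]
          · rw [if_neg (by omega), h0, dsum, if_pos rfl, add_zero]; omega
        rw [hds]
        simp [charVal_digitChar (n % 10) (Nat.mod_lt _ (by omega))]
      · rw [if_neg h0]
        have hn : n ≠ 0 := by intro hn; simp [hn] at h0
        have hds : dsum n = ((n % 10 : Nat) : Int) + dsum (n / 10) := by
          conv_lhs => rw [dsum]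
          rw [if_neg hn]
          omega
        rw [ih (n / 10) _ (by omega), hds]
        simp [charVal_digitChar (n % 10) (Nat.mod_lt _ (by omega))]
        ring

lemma digit_loop_B_eq (n : Nat) : ∀ s : Int, digit_loop_B n s = s + dsum n := by
  induction n using Nat.strong_induction_on with
  | _ n ih =>
      intro s
      rw [digit_loop_B, dsum]
      by_cases hn : n = 0
      · simp [hn]
      · rw [if_neg hn, if_neg hn, ih (n / 10) (Nat.div_lt_self (by omega) (by omega))]
        ring

lemma digit_sum_eq (n : Int) : digit_sum_A n = digit_sum_B n := by
  unfold digit_sum_A digit_sum_B PySem.Int.toChars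
  rw [if_neg (not_lt.mpr (abs_nonneg n)), Nat.toDigits]
  rw [show |n|.toNat = n.natAbs by rw [Int.abs_eq_natAbs, Int.toNat_natCast]]
  rw [show (fun sums c => sums + (PySem.Int.ofChars? [c]).getD 0) = (fun a c => a + charVal c) from rfl,
    foldl_charVal]
  rw [sum_toDigitsCore (n.natAbs + 1) n.natAbs [] (by omega)]
  rw [digit_loop_B_eq]
  simp

lemma loop_A_iff (first : Int) (l : List Int) :
    loop_A first l = true ↔ ∀ y ∈ l, digit_sum_B y = first := by
  induction l with
  | nil => simp [loop_A]
  | cons y t ih =>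
      rw [loop_A]
      by_cases h : digit_sum_A y ≠ first
      · simp only [if_pos h]
        rw [digit_sum_eq] at h
        simp [h]
      · simp only [if_neg h]
        rw [digit_sum_eq, not_not] at h
        simp [ih, h]

lemma mem_foldl_add_init (l : List Int) : ∀ (s : PySem.Set Int) (b : Int),
    b ∈ s → b ∈ l.foldl PySem.Set.add s := by
  induction l with
  | nil => intro s b hb; simpa using hb
  | cons x t ih =>
      intro s b hb
      exact ih _ b ((PySem.Set.mem_add s x b).mpr (Or.inl hb))

lemma mem_foldl_add (l : List Int) : ∀ (s : PySem.Set Int) (b : Int),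
    b ∈ l → b ∈ l.foldl PySem.Set.add s := by
  induction l with
  | nil => intro s b hb; simp at hb
  | cons x t ih =>
      intro s b hb
      rcases List.mem_cons.mp hb with hb | hb
      · rw [hb]
        exact mem_foldl_add_init t _ x ((PySem.Set.mem_add s x x).mpr (Or.inr rfl))
      · exact ih _ b hb

lemma foldl_add_const (l : List Int) (a : Int) (h : ∀ b ∈ l, b = a) :
    l.foldl PySem.Set.add [a] = [a] := by
  induction l with
  | nil => rfl
  | cons x t ih =>
      have hx : x = a := h x (by simp)
      have hadd : PySem.Set.add [a] a = [a] := by simp [PySem.Set.add]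
      rw [List.foldl_cons, hx, hadd]
      exact ih (fun b hb => h b (by simp [hb]))

lemma set_len_cons (a : Int) (l : List Int) :
    (PySem.Set.len (PySem.Set.ofList (a :: l)) ≤ 1) ↔ ∀ b ∈ l, b = a := by
  rw [PySem.Set.ofList_eq_foldl, List.foldl_cons]
  have hadd : PySem.Set.add ([] : PySem.Set Int) a = [a] := by simp [PySem.Set.add]
  rw [hadd]
  constructor
  · intro hlen b hb
    by_contra hne
    have hbmem : b ∈ l.foldl PySem.Set.add [a] := mem_foldl_add l [a] b hb
    have hamem : a ∈ l.foldl PySem.Set.add [a] := mem_foldl_add_init l [a] a (by simp)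
    unfold PySem.Set.len at hlen
    have hlen' : (l.foldl PySem.Set.add [a]).length ≤ 1 := by exact_mod_cast hlen
    match hres : l.foldl PySem.Set.add [a] with
    | [] => rw [hres] at hbmem; simp at hbmem
    | [c] =>
        rw [hres] at hbmem hamem
        simp at hbmem hamem
        exact hne (hbmem.trans hamem.symm)
    | c :: d :: t => rw [hres] at hlen'; simp at hlen'
  · intro h
    rw [foldl_add_const l a h]
    unfold PySem.Set.len
    simp

-- ===== VERDICT (by name: the statement is the Claim_ definition above) =====
theorem same_digit_sum_spec : Claim_equal_same_digit_sum := by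
  intro arr _
  unfold Spec_same_digit_sum same_digit_sum same_digit_sum_alt
  cases arr with
  | nil => simp [PySem.Set.ofList, PySem.Set.len]
  | cons x rest =>
      rw [if_neg (by simp)]
      have hget : (PySem.List.pyGet? (x :: rest) 0).getD 0 = x := by
        simp [pysem]
      rw [hget, PySem.List.slice_from_one, List.tail_cons, digit_sum_eq]
      have hmap : (x :: rest).map digit_sum_B = digit_sum_B x :: rest.map digit_sum_B := rfl
      rw [hmap]
      rcases hl : loop_A (digit_sum_B x) rest with hfalse | htrue
      · have hne : ¬ ∀ y ∈ rest, digit_sum_B y = digit_sum_B x := by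
          rw [← loop_A_iff]; simp [hl]
        have hset : ¬ ∀ b ∈ rest.map digit_sum_B, b = digit_sum_B x := by
          intro hall
          exact hne (fun y hy => hall (digit_sum_B y) (List.mem_map_of_mem hy))
        rw [← set_len_cons] at hset
        exact (decide_eq_false hset).symm
      · have hall : ∀ y ∈ rest, digit_sum_B y = digit_sum_B x := (loop_A_iff _ _).mp hl
        have hall' : ∀ b ∈ rest.map digit_sum_B, b = digit_sum_B x := by
          intro b hb
          rcases List.mem_map.mp hb with ⟨y, hy, rfl⟩
          exact hall y hy
        rw [← set_len_cons] at hall'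
        exact (decide_eq_true hall').symm
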